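-- pv_equiv track=rewrite | github.com/MatthieuTRANCPE/TP2-Pendu-Matthieu-TRAN | TP2 Pendu/Code python/TP2.py | fJeu
-- ===== SOURCE A (Python) =====
-- def fJeu(pM,pT,pE,pLE,plettre):
--     if plettre in pLE:
--         return pT,pE,pLE
--     pLE=pLE+plettre
--     if plettre in pM: #Le mot est parcouru pour savoir si chaque lettre du mot caché correspond à la lettre proposée
--         for i in range (len(pM)):
--             if plettre==pM[i]:
--                 pT=pT[0:i]+plettre+pT[i+1:len(pT)]
--     else:
--         pE=pE+1
--     return pT,pE,pLE
-- ===== SOURCE B (Python) =====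
-- def fJeu(pM, pT, pE, pLE, plettre):
--     if plettre in pLE:
--         return pT, pE, pLE
--     seen = pLE + plettre
--     if plettre not in pM:
--         return pT, pE + 1, seen
--     revealed = ''.join(plettre if m == plettre else t for m, t in zip(pM, pT))
--     return revealed, pE, seen
-- ===== Notes on version B (the rewrite author's own statement) =====
-- stated objective: simpler
-- what changed: A tests membership then loops over word indices rebuilding the whole display by slice concatenation at each match; B is an early-return chain whose reveal is a single zip comprehension over the aligned (word, display) pair joined once.
-- intended difference: On inputs where the guess is new and occurs in the word but the display pT does not have the word's length (longer, or shorter with a matching letter beyond the display's end), A's slice arithmetic keeps a stale tail or appends letters past the display while B reveals positionally over the aligned pair; in hangman the display mirrors the word position by position, so B's positional reveal is the intended value. — e.g. on fJeu("ab", "x", 0, "", "b"): A returns ("xb", 0, "b"), B returns ("x", 0, "b")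
import Mathlib
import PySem

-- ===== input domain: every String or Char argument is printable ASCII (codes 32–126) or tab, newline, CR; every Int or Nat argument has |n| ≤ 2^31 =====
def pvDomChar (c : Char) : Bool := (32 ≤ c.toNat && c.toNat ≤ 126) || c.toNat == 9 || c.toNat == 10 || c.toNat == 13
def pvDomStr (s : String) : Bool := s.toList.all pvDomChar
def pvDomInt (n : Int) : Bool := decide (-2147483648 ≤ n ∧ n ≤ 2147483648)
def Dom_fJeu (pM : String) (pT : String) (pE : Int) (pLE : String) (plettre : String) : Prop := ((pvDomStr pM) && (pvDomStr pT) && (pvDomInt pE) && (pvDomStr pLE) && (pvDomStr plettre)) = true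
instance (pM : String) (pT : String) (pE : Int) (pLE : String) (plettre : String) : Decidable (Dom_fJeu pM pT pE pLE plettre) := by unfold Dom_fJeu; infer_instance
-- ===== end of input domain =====

-- B replaces A's index loop of slice-and-concatenate rebuilds by an early-return chain whose
-- reveal is one zip pass over the aligned (word, display) pair (objective: simpler); on
-- length-mismatched displays A's accidental appends/stale tails are declared in D_fJeu.


-- ===== PORT A =====
-- Literal port of A: substring guard, pLE concatenation, then a loop over range(len(pM))
-- rebuilding pT by slicing (pT[0:i] + plettre + pT[i+1:len(pT)]) at each matching index.
-- String '+' is ported as String.ofList of the concatenated toLists (Lean's String.append is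
-- kernel-opaque); 'plettre == pM[i]' compares plettre's characters with the one-char string pM[i].
def fJeu (pM : String) (pT : String) (pE : Int) (pLE : String) (plettre : String) : String × Int × String :=
  if PySem.Str.isIn plettre pLE then (pT, pE, pLE)
  else
    if PySem.Str.isIn plettre pM then
      ((PySem.List.pyRange 0 (PySem.Str.len pM)).foldl
        (fun t i =>
          if plettre.toList = ((PySem.Str.pyGet? pM i).elim [] (fun c => [c])) then
            String.ofList ((PySem.Str.slice t (some 0) (some i)).toList ++ plettre.toList
              ++ (PySem.Str.slice t (some (i + 1)) (some (PySem.Str.len t))).toList)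
          else t) pT,
       pE, String.ofList (pLE.toList ++ plettre.toList))
    else (pT, pE + 1, String.ofList (pLE.toList ++ plettre.toList))

-- ===== PORT B =====
-- Literal port of B: early-return chain; the reveal is ''.join over zip(pM, pT) — ported as the
-- flatten of the mapped zip of the character lists — joined into a string once.
def fJeu_alt (pM : String) (pT : String) (pE : Int) (pLE : String) (plettre : String) : String × Int × String :=
  if PySem.Str.isIn plettre pLE then (pT, pE, pLE)
  else
    let seen := String.ofList (pLE.toList ++ plettre.toList)
    if PySem.Str.isIn plettre pM = false then (pT, pE + 1, seen)
    else
      (String.ofList (((pM.toList.zip pT.toList).map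
          (fun mt => if plettre.toList = [mt.1] then plettre.toList else [mt.2])).flatten),
       pE, seen)

-- ===== PRECONDITION & SPEC =====
-- On inputs where the guess is new and occurs in the word but the display pT does not have the
-- word's length (longer, or shorter with a matching letter beyond the display's end), A's slice
-- arithmetic keeps a stale tail or appends letters past the display while B reveals positionally
-- over the aligned pair; in hangman the display mirrors the word position by position, so B's
-- positional reveal is the intended value.
def D_fJeu (pM : String) (pT : String) (pE : Int) (pLE : String) (plettre : String) : Prop :=
  PySem.Str.isIn plettre pLE = false ∧ PySem.Str.isIn plettre pM = true ∧
    (pM.toList.length < pT.toList.length ∨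
      ∃ c ∈ pM.toList.drop pT.toList.length, plettre.toList = [c])
instance (pM : String) (pT : String) (pE : Int) (pLE : String) (plettre : String) : Decidable (D_fJeu pM pT pE pLE plettre) := by unfold D_fJeu; infer_instance
def Spec_fJeu (pM : String) (pT : String) (pE : Int) (pLE : String) (plettre : String) (out : String × Int × String) : Prop := ¬ D_fJeu pM pT pE pLE plettre → out = fJeu_alt pM pT pE pLE plettre
instance (pM : String) (pT : String) (pE : Int) (pLE : String) (plettre : String) (out : String × Int × String) : Decidable (Spec_fJeu pM pT pE pLE plettre out) := by unfold Spec_fJeu; infer_instance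
def pvDiffWitness_fJeu : String × String × Int × String × String := ("ab", "x", 0, "", "b")
def pvDiffWitnessOut_fJeu : (String × Int × String) × (String × Int × String) :=
  (("xb", 0, "b"), ("x", 0, "b"))

-- ===== CLAIM (what is proved, stated in full; the proofs are below) =====
def Claim_unchanged_fJeu : Prop := ∀ (pM : String) (pT : String) (pE : Int) (pLE : String) (plettre : String), Dom_fJeu pM pT pE pLE plettre → Spec_fJeu pM pT pE pLE plettre (fJeu pM pT pE pLE plettre)
def Claim_changed_fJeu : Prop := Dom_fJeu (pvDiffWitness_fJeu.1) (pvDiffWitness_fJeu.2.1) (pvDiffWitness_fJeu.2.2.1) (pvDiffWitness_fJeu.2.2.2.1) (pvDiffWitness_fJeu.2.2.2.2) ∧ D_fJeu (pvDiffWitness_fJeu.1) (pvDiffWitness_fJeu.2.1) (pvDiffWitness_fJeu.2.2.1) (pvDiffWitness_fJeu.2.2.2.1) (pvDiffWitness_fJeu.2.2.2.2) ∧ fJeu (pvDiffWitness_fJeu.1) (pvDiffWitness_fJeu.2.1) (pvDiffWitness_fJeu.2.2.1) (pvDiffWitness_fJeu.2.2.2.1) (pvDiffWitness_fJeu.2.2.2.2)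 = pvDiffWitnessOut_fJeu.1 ∧ fJeu_alt (pvDiffWitness_fJeu.1) (pvDiffWitness_fJeu.2.1) (pvDiffWitness_fJeu.2.2.1) (pvDiffWitness_fJeu.2.2.2.1) (pvDiffWitness_fJeu.2.2.2.2) = pvDiffWitnessOut_fJeu.2 ∧ pvDiffWitnessOut_fJeu.1 ≠ pvDiffWitnessOut_fJeu.2
def Claim_exact_fJeu : Prop := ∀ (pM : String) (pT : String) (pE : Int) (pLE : String) (plettre : String), Dom_fJeu pM pT pE pLE plettre → D_fJeu pM pT pE pLE plettre → fJeu pM pT pE pLE plettre ≠ fJeu_alt pM pT pE pLE plettre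

-- ===== LEMMAS AND PROOFS =====

-- A's one loop step, as a function of the character-list state.
def pvStepL (pl : List Char) (s : List Char) (b : List Char) (i : Nat) : List Char :=
  match s[i]? with
  | some c => if pl = [c] then (if i < b.length then b.set i c else b ++ [c]) else b
  | none => b

-- A's slice-rebuild step equals pvStepL, pointwise (on toList), for an in-range index.
lemma stepA_toList (pM plettre t : String) (i : Nat) (hi : i < pM.toList.length) :
    (if plettre.toList = ((PySem.Str.pyGet? pM (i : Int)).elim [] (fun c => [c])) then
      String.ofList ((PySem.Str.slice t (some 0) (some (i : Int))).toList ++ plettre.toList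
        ++ (PySem.Str.slice t (some ((i : Int) + 1)) (some (PySem.Str.len t))).toList)
    else t).toList = pvStepL plettre.toList pM.toList t.toList i := by
  have hget : PySem.Str.pyGet? pM (i : Int) = pM.toList[i]? := PySem.Str.pyGet?_natCast pM i
  have hsome : pM.toList[i]? = some pM.toList[i] := List.getElem?_eq_getElem hi
  rw [pvStepL, hget, hsome]
  simp only [Option.elim]
  by_cases hc : plettre.toList = [pM.toList[i]]
  · rw [if_pos hc, if_pos hc, String.toList_ofList]
    have hz : (0 : Int) = ((0 : Nat) : Int) := rfl
    have h0 : ((i : Int) + 1) = ((i + 1 : Nat) : Int) := by push_cast; ring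
    rw [PySem.Str.len_eq, h0]
    simp only [PySem.Str.toList_slice, PySem.Chars.slice_eq_listSlice]
    rw [hz, PySem.List.slice_natCast, PySem.List.slice_natCast, hc]
    by_cases hb : i < t.toList.length
    · rw [if_pos hb, List.set_eq_take_cons_drop _ hb]
      have hd : (t.toList.drop (i + 1)).take (t.toList.length - (i + 1))
          = t.toList.drop (i + 1) := by
        apply List.take_of_length_le; simp
      rw [hd]
      simp
    · rw [if_neg hb]
      have h1 : (t.toList.drop 0).take (i - 0) = t.toList := by
        simp only [List.drop_zero, Nat.sub_zero]
        apply List.take_of_length_le; omega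
      have h2 : (t.toList.drop (i + 1)).take (t.toList.length - (i + 1)) = [] := by
        apply List.take_eq_nil_of_eq_nil
        apply List.drop_eq_nil_of_le; omega
      rw [h1, h2]
      simp
  · rw [if_neg hc, if_neg hc]

-- A's fold over a list of in-range indices computes pvStepL on the toList side.
lemma foldA_eq_foldL (pM plettre : String) (l : List Nat)
    (hl : ∀ i ∈ l, i < pM.toList.length) : ∀ (t : String),
    (l.foldl (fun t (i : Nat) =>
      if plettre.toList = ((PySem.Str.pyGet? pM (i : Int)).elim [] (fun c => [c])) then
        String.ofList ((PySem.Str.slice t (some 0) (some (i : Int))).toList ++ plettre.toList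
          ++ (PySem.Str.slice t (some ((i : Int) + 1)) (some (PySem.Str.len t))).toList)
      else t) t).toList
    = l.foldl (pvStepL plettre.toList pM.toList) t.toList := by
  induction l with
  | nil => intro t; rfl
  | cons i l ih =>
    intro t
    have hi : i < pM.toList.length := hl i (by simp)
    have hrec := ih (fun j hj => hl j (by simp [hj]))
    simp only [List.foldl_cons]
    rw [hrec, stepA_toList pM plettre t i hi]

-- A's whole loop, on toList, is the pvStepL fold over range (len pM).
lemma foldA_range (pM pT plettre : String) :
    ((PySem.List.pyRange 0 (PySem.Str.len pM)).foldl
      (fun t i =>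
        if plettre.toList = ((PySem.Str.pyGet? pM i).elim [] (fun c => [c])) then
          String.ofList ((PySem.Str.slice t (some 0) (some i)).toList ++ plettre.toList
            ++ (PySem.Str.slice t (some (i + 1)) (some (PySem.Str.len t))).toList)
        else t) pT).toList
    = (List.range pM.toList.length).foldl (pvStepL plettre.toList pM.toList) pT.toList := by
  rw [PySem.Str.len_eq, PySem.List.pyRange_zero_natCast, List.foldl_map]
  exact foldA_eq_foldL pM plettre (List.range pM.toList.length)
    (fun i hi => by simpa using hi) pT

-- When every matching index of l is inside the buffer, the fold only sets: it keeps the length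
-- and is characterised pointwise by getElem?.
lemma foldSet (pl s : List Char) : ∀ (l : List Nat) (b : List Char),
    (∀ i ∈ l, ∀ c, s[i]? = some c → pl = [c] → i < b.length) →
    (l.foldl (pvStepL pl s) b).length = b.length ∧
    ∀ j : Nat, (l.foldl (pvStepL pl s) b)[j]?
      = (if j ∈ l ∧ (∃ c, s[j]? = some c ∧ pl = [c]) then s[j]? else b[j]?) := by
  intro l
  induction l with
  | nil =>
    intro b _
    constructor
    · rfl
    · intro j; simp
  | cons i l ih =>
    intro b hb
    simp only [List.foldl_cons]
    rcases hs : s[i]? with _ | c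
    · have hid : pvStepL pl s b i = b := by simp [pvStepL, hs]
      rw [hid]
      obtain ⟨hlen, hget⟩ := ih b (fun j hj => hb j (by simp [hj]))
      refine ⟨hlen, fun j => ?_⟩
      rw [hget j]
      by_cases hji : j = i
      · subst hji
        simp [hs]
      · simp [List.mem_cons, hji]
    · by_cases hm : pl = [c]
      · have hib : i < b.length := hb i (by simp) c hs hm
        have hid : pvStepL pl s b i = b.set i c := by
          simp [pvStepL, hs, hm, hib]
        rw [hid]
        obtain ⟨hlen, hget⟩ := ih (b.set i c)
          (fun j hj c' h1 h2 => by
            have := hb j (by simp [hj]) c' h1 h2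
            simpa using this)
        refine ⟨by simpa using hlen, fun j => ?_⟩
        rw [hget j]
        by_cases hP : j ∈ l ∧ (∃ c', s[j]? = some c' ∧ pl = [c'])
        · rw [if_pos hP, if_pos ⟨by simp [hP.1], hP.2⟩]
        · rw [if_neg hP]
          by_cases hji : j = i
          · subst hji
            rw [if_pos ⟨by simp, c, hs, hm⟩, hs]
            simp [hib]
          · rw [if_neg (by
              rintro ⟨hj1, hj2⟩
              rcases List.mem_cons.mp hj1 with h | h
              · exact hji h
              · exact hP ⟨h, hj2⟩)]
            have hij : ¬ i = j := fun h => hji h.symm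
            simp [hij]
      · have hid : pvStepL pl s b i = b := by simp [pvStepL, hs, hm]
        rw [hid]
        obtain ⟨hlen, hget⟩ := ih b (fun j hj => hb j (by simp [hj]))
        refine ⟨hlen, fun j => ?_⟩
        rw [hget j]
        by_cases hji : j = i
        · subst hji
          have : ¬ (∃ c', s[j]? = some c' ∧ pl = [c']) := by
            rintro ⟨c', h1, h2⟩
            rw [hs, Option.some.injEq] at h1
            subst h1
            exact hm h2
          simp only [this, and_false, if_false]
        · simp [List.mem_cons, hji]

-- flatten of the mapped zip (each piece a singleton) is the plain map over the zip.
lemma flatten_singletons (pl : List Char) : ∀ (zs : List (Char × Char)),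
    (zs.map (fun mt => if pl = [mt.1] then pl else [mt.2])).flatten
      = zs.map (fun mt => if pl = [mt.1] then mt.1 else mt.2) := by
  intro zs
  induction zs with
  | nil => rfl
  | cons mt zs ih =>
    simp only [List.map_cons, List.flatten_cons, ih]
    by_cases hm : pl = [mt.1]
    · rw [if_pos hm, if_pos hm, hm]; rfl
    · rw [if_neg hm, if_neg hm]; rfl

-- when the display is no longer than the word and no match lies beyond it, A's fold equals
-- B's zip-map.
lemma fold_eq_zip (pl s b : List Char) (hle : b.length ≤ s.length)
    (hno : ∀ c ∈ s.drop b.length, pl ≠ [c]) :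
    (List.range s.length).foldl (pvStepL pl s) b
      = (s.zip b).map (fun mt => if pl = [mt.1] then mt.1 else mt.2) := by
  have hb : ∀ i ∈ List.range s.length, ∀ c, s[i]? = some c → pl = [c] → i < b.length := by
    intro i hi c h1 h2
    by_contra hcon
    push_neg at hcon
    have hiL : i < s.length := by simpa using hi
    have hcmem : c ∈ s.drop b.length := by
      have hval : s[i]'hiL = c := by
        rw [List.getElem?_eq_getElem hiL] at h1
        exact Option.some.inj h1
      rw [← hval]
      have hidx : (s.drop b.length)[i - b.length]'(by simp; omega) = s[i]'hiL := by
        rw [List.getElem_drop]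
        congr 1; omega
      rw [← hidx]
      exact List.getElem_mem _
    exact hno c hcmem h2
  obtain ⟨hlen, hget⟩ := foldSet pl s (List.range s.length) b hb
  apply List.ext_getElem?
  intro j
  rw [hget j]
  by_cases hj : j < b.length
  · have hjs : j < s.length := lt_of_lt_of_le hj hle
    have hz : (s.zip b)[j]? = some (s[j]'hjs, b[j]'hj) := by
      have hjz : j < (s.zip b).length := by simp [List.length_zip]; omega
      rw [List.getElem?_eq_getElem hjz, List.getElem_zip]
    rw [List.getElem?_map, hz]
    by_cases hm : pl = [s[j]'hjs]
    · rw [if_pos ⟨by simpa using hjs, s[j]'hjs, List.getElem?_eq_getElem hjs, hm⟩,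
        List.getElem?_eq_getElem hjs]
      simp [hm]
    · rw [if_neg (by
        rintro ⟨-, c, h1, h2⟩
        rw [List.getElem?_eq_getElem hjs] at h1
        exact hm (by injection h1 with h; rw [h2, h]))]
      simp [List.getElem?_eq_getElem hj, hm]
  · have hnone1 : b[j]? = none := by simp; omega
    have hnone2 : ((s.zip b).map (fun mt => if pl = [mt.1] then mt.1 else mt.2))[j]? = none := by
      simp [List.length_zip]; omega
    rw [hnone2]
    rw [if_neg (by
      rintro ⟨-, c, h1, h2⟩
      have hjs : j < s.length := by
        by_contra h
        simp [List.getElem?_eq_none (by omega : s.length ≤ j)] at h1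
      have hcmem : c ∈ s.drop b.length := by
        have hval : s[j]'hjs = c := by
          rw [List.getElem?_eq_getElem hjs] at h1; injection h1
        rw [← hval]
        have : (s.drop b.length)[j - b.length]'(by simp; omega) = s[j]'hjs := by
          rw [List.getElem_drop]; congr 1; omega
        rw [← this]; exact List.getElem_mem _
      exact hno c hcmem h2)]
    exact hnone1

-- appending phase: once the start index is past the buffer, each matching index appends one letter.
lemma fold_grow (pl s : List Char) : ∀ (m a : Nat) (b : List Char), b.length ≤ a →
    ((List.range' a m).foldl (pvStepL pl s) b).length
      = b.length + ((List.range' a m).countP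
          (fun i => (s[i]?).elim false (fun c => decide (pl = [c])))) := by
  intro m
  induction m with
  | zero => intro a b _; simp
  | succ m ih =>
    intro a b hba
    rw [List.range'_succ, List.foldl_cons, List.countP_cons]
    rcases hs : s[a]? with _ | c
    · have hid : pvStepL pl s b a = b := by simp [pvStepL, hs]
      rw [hid, ih (a + 1) b (by omega)]
      simp [hs]
    · by_cases hm : pl = [c]
      · have hid : pvStepL pl s b a = b ++ [c] := by
          have : ¬ a < b.length := by omega
          simp [pvStepL, hs, hm, this]
        rw [hid, ih (a + 1) (b ++ [c]) (by simp; omega)]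
        simp [hm]
        omega
      · have hid : pvStepL pl s b a = b := by simp [pvStepL, hs, hm]
        rw [hid, ih (a + 1) b (by omega)]
        simp [hm]

-- ===== VERDICT (by name: the statement is the Claim_ definition above) =====
theorem fJeu_spec : Claim_unchanged_fJeu := by
  intro pM pT pE pLE plettre _hDom
  unfold Spec_fJeu
  intro hnD
  unfold fJeu fJeu_alt
  by_cases h1 : PySem.Str.isIn plettre pLE = true
  · rw [if_pos h1, if_pos h1]
  · rw [if_neg h1, if_neg h1]
    by_cases h2 : PySem.Str.isIn plettre pM = true
    · rw [if_pos h2]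
      rw [if_neg (by intro hf; rw [h2] at hf; cases hf)]
      have hD' : ¬ (pM.toList.length < pT.toList.length ∨
          ∃ c ∈ pM.toList.drop pT.toList.length, plettre.toList = [c]) := by
        intro hor
        exact hnD ⟨by simpa using h1, h2, hor⟩
      push_neg at hD'
      obtain ⟨hle, hno⟩ := hD'
      refine Prod.ext ?_ rfl
      apply String.toList_injective  -- placeholder; adjust
      rw [foldA_range]
      rw [String.toList_ofList, flatten_singletons]
      exact fold_eq_zip plettre.toList pM.toList pT.toList (by omega) hno
    · rw [if_neg h2, if_pos (by simpa using h2)]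

set_option maxRecDepth 8000 in
theorem fJeu_changed : Claim_changed_fJeu := by
  unfold Claim_changed_fJeu
  refine ⟨by decide, ?_, by decide, by decide, by decide⟩
  unfold D_fJeu
  exact ⟨by decide, by decide, Or.inr ⟨'b', by decide, by decide⟩⟩

theorem fJeu_tight : Claim_exact_fJeu := by
  intro pM pT pE pLE plettre _hDom hD
  obtain ⟨h1, h2, hor⟩ := hD
  unfold fJeu fJeu_alt
  rw [if_neg (by intro hf; rw [h1] at hf; cases hf)]
  rw [if_pos h2]
  rw [if_neg (by intro hf; rw [h1] at hf; cases hf)]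
  rw [if_neg (by intro hf; rw [h2] at hf; cases hf)]
  intro heq
  have hfst := congrArg (fun x : String × Int × String => x.1.toList.length) heq
  simp only [String.toList_ofList, flatten_singletons, List.length_map, List.length_zip] at hfst
  rw [foldA_range] at hfst
  rcases hor with hlt | ⟨c, hc, hpl⟩
  · -- display longer than the word: A keeps pT's length, B truncates to the word's length
    have hlen := (foldSet plettre.toList pM.toList (List.range pM.toList.length) pT.toList
      (fun i hi c _ _ => by
        have : i < pM.toList.length := by simpa using hi
        omega)).1
    rw [hlen] at hfst
    omega
  · -- a matching letter beyond the display's end: A appends at least one letter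
    have hLn : pT.toList.length < pM.toList.length := by
      by_contra hcon
      push_neg at hcon
      rw [List.drop_eq_nil_of_le hcon] at hc
      cases hc
    have hsplit : List.range pM.toList.length
        = List.range' 0 pT.toList.length
          ++ List.range' pT.toList.length (pM.toList.length - pT.toList.length) := by
      rw [List.range_eq_range']
      have h := @List.range'_append_1 0 pT.toList.length (pM.toList.length - pT.toList.length)
      rw [Nat.zero_add] at h
      have hn : pM.toList.length = pT.toList.length + (pM.toList.length - pT.toList.length) := by
        omega
      conv_lhs => rw [hn]
      exact h.symm
    rw [hsplit, List.foldl_append] at hfst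
    have hb1 := (foldSet plettre.toList pM.toList (List.range' 0 pT.toList.length) pT.toList
      (fun i hi c _ _ => by
        rw [List.mem_range'_1] at hi
        omega)).1
    have hgrow := fold_grow plettre.toList pM.toList
      (pM.toList.length - pT.toList.length) pT.toList.length
      ((List.range' 0 pT.toList.length).foldl (pvStepL plettre.toList pM.toList) pT.toList)
      (by omega)
    rw [hb1] at hgrow
    rw [hgrow] at hfst
    -- the count is positive: the matching index pT.length + m witnesses it
    obtain ⟨m, hm, hval⟩ := List.mem_iff_getElem.mp hc
    have hmlen : pT.toList.length + m < pM.toList.length := by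
      have := hm
      simp only [List.length_drop] at this
      omega
    have hpos : 0 < (List.range' pT.toList.length (pM.toList.length - pT.toList.length)).countP
        (fun i => (pM.toList[i]?).elim false (fun c => decide (plettre.toList = [c]))) := by
      rw [List.countP_pos_iff]
      refine ⟨pT.toList.length + m, by rw [List.mem_range'_1]; omega, ?_⟩
      have hgi : pM.toList[pT.toList.length + m]? = some c := by
        rw [List.getElem?_eq_getElem hmlen]
        rw [← hval, List.getElem_drop]
      rw [hgi]
      simpa using hpl
    omega
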